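-- pv_equiv track=rewrite | github.com/IgnacioTejeraPicossi/Viking-Civilisation-Prediction-Astar-Island-NM-i-AI-2026 | src/astar_island/query_planner.py | _pick_window
-- ===== SOURCE A (Python) =====
-- def _pick_window(
--     ranked: list[tuple[float, int, int]],
--     avoid: set[tuple[int, int]],
--     min_index: int = 0,
-- ) -> tuple[int, int] | None:
--     for i, (_, x, y) in enumerate(ranked):
--         if i < min_index:
--             continue
--         if (x, y) not in avoid:
--             return x, y
--     for _, x, y in ranked:
--         if (x, y) not in avoid:
--             return x, y
--     return None
-- ===== SOURCE B (Python) =====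
-- def _pick_window(
--     ranked: list[tuple[float, int, int]],
--     avoid: set[tuple[int, int]],
--     min_index: int = 0,
-- ) -> tuple[int, int] | None:
--     fallback = None
--     for i, (_, x, y) in enumerate(ranked):
--         if (x, y) in avoid:
--             continue
--         if i >= min_index:
--             return x, y
--         if fallback is None:
--             fallback = (x, y)
--     return fallback
-- ===== Notes on version B (the rewrite author's own statement) =====
-- stated objective: simpler
-- what changed: Replaces A's two scans (window scan from min_index, then full fallback rescan) with one pass that returns immediately at index >= min_index and remembers the first non-avoided low-index coordinate as fallback.
import Mathlib
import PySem

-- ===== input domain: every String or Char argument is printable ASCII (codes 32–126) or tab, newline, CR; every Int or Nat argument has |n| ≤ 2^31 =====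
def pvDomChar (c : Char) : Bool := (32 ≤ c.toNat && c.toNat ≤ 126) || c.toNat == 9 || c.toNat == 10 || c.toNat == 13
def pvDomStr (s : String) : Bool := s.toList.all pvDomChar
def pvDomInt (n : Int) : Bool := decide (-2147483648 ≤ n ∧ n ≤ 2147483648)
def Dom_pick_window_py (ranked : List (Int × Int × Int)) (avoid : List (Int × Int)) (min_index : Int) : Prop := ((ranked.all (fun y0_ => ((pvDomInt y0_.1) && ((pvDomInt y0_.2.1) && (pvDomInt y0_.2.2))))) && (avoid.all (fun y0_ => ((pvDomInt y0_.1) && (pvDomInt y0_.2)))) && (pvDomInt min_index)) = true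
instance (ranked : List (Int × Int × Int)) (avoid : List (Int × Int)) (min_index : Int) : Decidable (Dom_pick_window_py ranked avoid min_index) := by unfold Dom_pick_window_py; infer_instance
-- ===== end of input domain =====

-- B replaces A's two scans with a single pass keeping the first low-index non-avoided pair as a fallback; same return value.
-- ===== PORT A =====
-- first loop of A: enumerate(ranked), skip i < min_index, return first (x,y) not in avoid
def pwWindowLoop (avoid : List (Int × Int)) (min_index : Int) : Int → List (Int × Int × Int) → Option (Int × Int)
  | _, [] => none
  | i, (_, x, y) :: rest =>
    if i < min_index then pwWindowLoop avoid min_index (i + 1) rest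
    else if ¬ avoid.contains (x, y) then some (x, y)
    else pwWindowLoop avoid min_index (i + 1) rest

-- second loop of A: first (x,y) of ranked not in avoid
def pwAnyLoop (avoid : List (Int × Int)) : List (Int × Int × Int) → Option (Int × Int)
  | [] => none
  | (_, x, y) :: rest =>
    if ¬ avoid.contains (x, y) then some (x, y) else pwAnyLoop avoid rest

def pick_window_py (ranked : List (Int × Int × Int)) (avoid : List (Int × Int)) (min_index : Int) : Option (Int × Int) :=
  match pwWindowLoop avoid min_index 0 ranked with
  | some v => some v
  | none => pwAnyLoop avoid ranked

-- ===== PORT B =====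
-- single pass with fallback accumulator, as in Source B
def pwOnePass (avoid : List (Int × Int)) (min_index : Int) : Int → Option (Int × Int) → List (Int × Int × Int) → Option (Int × Int)
  | _, fb, [] => fb
  | i, fb, (_, x, y) :: rest =>
    if avoid.contains (x, y) then pwOnePass avoid min_index (i + 1) fb rest
    else if min_index ≤ i then some (x, y)
    else match fb with
      | none => pwOnePass avoid min_index (i + 1) (some (x, y)) rest
      | some f => pwOnePass avoid min_index (i + 1) (some f) rest

def pick_window_py_alt (ranked : List (Int × Int × Int)) (avoid : List (Int × Int)) (min_index : Int) : Option (Int × Int) :=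
  pwOnePass avoid min_index 0 none ranked

-- ===== PRECONDITION & SPEC =====
def Spec_pick_window_py (ranked : List (Int × Int × Int)) (avoid : List (Int × Int)) (min_index : Int) (out : Option (Int × Int)) : Prop := out = pick_window_py_alt ranked avoid min_index
instance (ranked : List (Int × Int × Int)) (avoid : List (Int × Int)) (min_index : Int) (out : Option (Int × Int)) : Decidable (Spec_pick_window_py ranked avoid min_index out) := by unfold Spec_pick_window_py; infer_instance

-- ===== CLAIM (what is proved, stated in full; the proofs are below) =====
def Claim_equal_pick_window_py : Prop := ∀ (ranked : List (Int × Int × Int)) (avoid : List (Int × Int)) (min_index : Int), Dom_pick_window_py ranked avoid min_index → Spec_pick_window_py ranked avoid min_index (pick_window_py ranked avoid min_index)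

-- ===== LEMMAS AND PROOFS =====

-- first (x,y) not in avoid among elements whose index is < min_index
def pwLow (avoid : List (Int × Int)) (min_index : Int) : Int → List (Int × Int × Int) → Option (Int × Int)
  | _, [] => none
  | i, (_, x, y) :: rest =>
    if i < min_index ∧ ¬ avoid.contains (x, y) then some (x, y)
    else pwLow avoid min_index (i + 1) rest

-- the one-pass loop equals: window result, else fallback, else first low-index non-avoided
theorem pwOnePass_eq (avoid : List (Int × Int)) (min_index : Int) :
    ∀ (l : List (Int × Int × Int)) (i : Int) (fb : Option (Int × Int)),
      pwOnePass avoid min_index i fb l =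
        ((pwWindowLoop avoid min_index i l).orElse
          (fun _ => fb.orElse (fun _ => pwLow avoid min_index i l))) := by
  intro l
  induction l with
  | nil => intro i fb; simp [pwOnePass, pwWindowLoop, pwLow]
  | cons hd tl ih =>
    intro i fb
    obtain ⟨_, x, y⟩ := hd
    by_cases hc : (x, y) ∈ avoid
    · by_cases hi : i < min_index <;>
        simp [pwOnePass, pwWindowLoop, pwLow, hc, hi, ih]
    · by_cases hi : min_index ≤ i
      · have hlt : ¬ i < min_index := by omega
        simp [pwOnePass, pwWindowLoop, hc, hi, hlt, Option.orElse]
      · have hlt : i < min_index := by omega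
        cases fb <;>
          cases hrec : pwWindowLoop avoid min_index (i + 1) tl <;>
            simp [pwOnePass, pwWindowLoop, pwLow, hc, hi, hlt, ih, hrec, Option.orElse]

-- when the window scan finds nothing, the full rescan equals the low-index scan
theorem pwAny_eq_low (avoid : List (Int × Int)) (min_index : Int) :
    ∀ (l : List (Int × Int × Int)) (i : Int),
      pwWindowLoop avoid min_index i l = none →
      pwAnyLoop avoid l = pwLow avoid min_index i l := by
  intro l
  induction l with
  | nil => intro i _; simp [pwAnyLoop, pwLow]
  | cons hd tl ih =>
    intro i hnone
    obtain ⟨_, x, y⟩ := hd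
    by_cases hc : (x, y) ∈ avoid
    · have hrec : pwWindowLoop avoid min_index (i + 1) tl = none := by
        by_cases hi : i < min_index <;>
          simpa [pwWindowLoop, hc, hi] using hnone
      simp [pwAnyLoop, pwLow, hc, ih _ hrec]
    · by_cases hi : i < min_index
      · have hrec : pwWindowLoop avoid min_index (i + 1) tl = none := by
          simpa [pwWindowLoop, hc, hi] using hnone
        simp [pwAnyLoop, pwLow, hc, hi]
      · exfalso
        simp [pwWindowLoop, hc, hi] at hnone

-- ===== VERDICT (by name: the statement is the Claim_ definition above) =====
theorem pick_window_py_spec : Claim_equal_pick_window_py := by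
  intro ranked avoid min_index _
  unfold Spec_pick_window_py pick_window_py pick_window_py_alt
  rw [pwOnePass_eq]
  cases hw : pwWindowLoop avoid min_index 0 ranked with
  | some v => simp [Option.orElse]
  | none => simp [Option.orElse, pwAny_eq_low avoid min_index ranked 0 hw]
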